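-- pv_equiv track=rewrite | github.com/alex-beaverg/PythonQA_Lessons | HW_11_PyTest_and_Unittest/HW_11_2_Functions.py | even_numbers_from_list_var2
-- ===== SOURCE A (Python) =====
-- def even_numbers_from_list_var2(income_list: list) -> list:
--     """Docstring: Function to return new list with even numbers from income list. Variant 2"""
--     result = []
--     for i in range(len(income_list)):
--         if income_list[i] == 237:
--             break
--         elif income_list[i] % 2 == 0:
--             result.append(income_list[i])
--     return result
-- ===== SOURCE B (Python) =====
-- def even_numbers_from_list_var2(income_list: list) -> list:
--     """Boundary-first: locate the first 237 (if any), then filter the prefix."""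
--     prefix = income_list[:income_list.index(237)] if 237 in income_list else income_list
--     return [x for x in prefix if x % 2 == 0]
-- ===== Notes on version B (the rewrite author's own statement) =====
-- stated objective: alternative
-- what changed: B first locates the cut-off (prefix before the first 237 via 'in'/index/slice, or the whole list) and then filters that prefix with a comprehension, instead of A's single interleaved index loop with break-and-append.
import Mathlib
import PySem

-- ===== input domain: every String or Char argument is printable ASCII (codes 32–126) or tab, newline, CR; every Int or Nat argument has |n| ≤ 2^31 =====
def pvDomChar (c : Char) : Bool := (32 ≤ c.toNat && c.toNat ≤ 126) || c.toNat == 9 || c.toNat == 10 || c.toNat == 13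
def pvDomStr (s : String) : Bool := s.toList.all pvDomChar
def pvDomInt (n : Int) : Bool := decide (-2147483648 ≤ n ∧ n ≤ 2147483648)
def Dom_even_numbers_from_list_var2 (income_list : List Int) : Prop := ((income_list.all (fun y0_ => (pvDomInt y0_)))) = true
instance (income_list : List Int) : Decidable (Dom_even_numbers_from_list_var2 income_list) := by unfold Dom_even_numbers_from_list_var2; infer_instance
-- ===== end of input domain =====

-- B locates the first 237 (via 'in'/index/slice) and then filters that prefix with a
-- comprehension: boundary-first decomposition instead of A's per-index loop with break.
-- ===== PORT A =====
-- loop 'for i in range(len(...))' with break: structural recursion over the remaining list,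
-- carrying the 'result' accumulator exactly as A does.
def evenA_go (acc : List Int) : List Int → List Int
  | [] => acc
  | x :: rest =>
    if x = 237 then acc
    else if PySem.Int.mod x 2 = 0 then evenA_go (acc ++ [x]) rest
    else evenA_go acc rest

def even_numbers_from_list_var2 (income_list : List Int) : List Int :=
  evenA_go [] income_list

-- ===== PORT B =====
-- B: boundary first (index of the first 237, slice), then a filtering pass.
def evenPrefix (income_list : List Int) : List Int :=
  match PySem.List.index? income_list 237 with
  | some i => income_list.take i          -- income_list[:income_list.index(237)] if 237 in income_list
  | none => income_list

def even_numbers_from_list_var2_alt (income_list : List Int) : List Int :=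
  (evenPrefix income_list).filter (fun x => PySem.Int.mod x 2 == 0)

-- ===== PRECONDITION & SPEC =====
def Spec_even_numbers_from_list_var2 (income_list : List Int) (out : List Int) : Prop := out = even_numbers_from_list_var2_alt income_list
instance (income_list : List Int) (out : List Int) : Decidable (Spec_even_numbers_from_list_var2 income_list out) := by unfold Spec_even_numbers_from_list_var2; infer_instance

-- ===== CLAIM (what is proved, stated in full; the proofs are below) =====
def Claim_equal_even_numbers_from_list_var2 : Prop := ∀ (income_list : List Int), Dom_even_numbers_from_list_var2 income_list → Spec_even_numbers_from_list_var2 income_list (even_numbers_from_list_var2 income_list)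

-- ===== LEMMAS AND PROOFS =====

-- ===== VERDICT (by name: the statement is the Claim_ definition above) =====
theorem alt_nil : even_numbers_from_list_var2_alt [] = [] := by
  simp [even_numbers_from_list_var2_alt, evenPrefix, PySem.List.index?]

theorem alt_cons_237 (rest : List Int) : even_numbers_from_list_var2_alt (237 :: rest) = [] := by
  unfold even_numbers_from_list_var2_alt evenPrefix
  rw [PySem.List.index?_cons_self]
  simp

theorem alt_cons_ne (x : Int) (rest : List Int) (hx : x ≠ 237) :
    even_numbers_from_list_var2_alt (x :: rest) =
      (if PySem.Int.mod x 2 == 0 then [x] else []) ++ even_numbers_from_list_var2_alt rest := by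
  unfold even_numbers_from_list_var2_alt evenPrefix
  simp only [PySem.List.index?_cons_of_ne rest hx]
  cases PySem.List.index? rest 237 <;>
    simp only [Option.map_some, Option.map_none, List.take_succ_cons, List.filter_cons] <;>
    split <;> simp

theorem evenA_go_eq (l : List Int) : ∀ acc, evenA_go acc l = acc ++ even_numbers_from_list_var2_alt l := by
  induction l with
  | nil => intro acc; simp [evenA_go, alt_nil]
  | cons x rest ih =>
    intro acc
    by_cases hx : x = 237
    · subst hx; simp [evenA_go, alt_cons_237]
    · rw [alt_cons_ne x rest hx]
      unfold evenA_go
      rw [if_neg hx]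
      by_cases he : PySem.Int.mod x 2 = 0
      · have hd := (PySem.Int.mod_eq_zero_iff_dvd x 2).mp he
        rw [if_pos he, ih]; simp [hd]
      · have hd : ¬ (2:Int) ∣ x := fun h => he ((PySem.Int.mod_eq_zero_iff_dvd x 2).mpr h)
        rw [if_neg he, ih]; simp [hd]

theorem even_numbers_from_list_var2_spec : Claim_equal_even_numbers_from_list_var2 := by
  intro l _
  unfold Spec_even_numbers_from_list_var2 even_numbers_from_list_var2
  simpa using evenA_go_eq l []
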